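-- pv_equiv track=rewrite | github.com/OiciruamauriciO/ai_video_generator_client | scripts/tts.py | unir_frases_cortas
-- ===== SOURCE A (Python) =====
-- def unir_frases_cortas(frases, min_len=10):
--     frases_limpias = []
--     buffer = ""
--     for frase in frases:
--         if len(frase.split()) < min_len:
--             buffer += " " + frase
--         else:
--             if buffer:
--                 frases_limpias.append(buffer.strip())
--                 buffer = ""
--             frases_limpias.append(frase)
--     if buffer:
--         frases_limpias.append(buffer.strip())
--     return frases_limpias
-- ===== SOURCE B (Python) =====
-- def unir_frases_cortas(frases, min_len=10):
--     # Stage 1: index the positions of the long sentences.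
--     longs = [i for i, f in enumerate(frases) if len(f.split()) >= min_len]
--     # Stage 2: emit each long sentence, joining the slice of short
--     # sentences that sits between consecutive long positions.
--     resultado = []
--     prev = 0
--     for i in longs:
--         if prev < i:
--             resultado.append(' '.join(frases[prev:i]).strip())
--         resultado.append(frases[i])
--         prev = i + 1
--     if prev < len(frases):
--         resultado.append(' '.join(frases[prev:]).strip())
--     return resultado
-- ===== Notes on version B (the rewrite author's own statement) =====
-- stated objective: alternative
-- what changed: B first builds an index list of the long sentences, then assembles the output by slicing frases between consecutive long indices and joining each slice once; A's mutable string buffer and its flush logic disappear.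
import Mathlib
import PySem

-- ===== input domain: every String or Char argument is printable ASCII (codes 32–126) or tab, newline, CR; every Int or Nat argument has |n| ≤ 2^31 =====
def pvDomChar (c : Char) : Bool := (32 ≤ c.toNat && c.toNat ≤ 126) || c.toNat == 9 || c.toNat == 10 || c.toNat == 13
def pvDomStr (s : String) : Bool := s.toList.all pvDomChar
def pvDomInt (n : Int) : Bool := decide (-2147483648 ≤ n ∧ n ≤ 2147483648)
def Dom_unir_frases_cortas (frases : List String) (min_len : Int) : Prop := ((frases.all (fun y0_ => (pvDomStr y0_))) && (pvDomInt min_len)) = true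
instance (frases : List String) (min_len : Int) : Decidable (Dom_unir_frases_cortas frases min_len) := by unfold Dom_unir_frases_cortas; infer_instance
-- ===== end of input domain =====

-- B replaces A's mutable string buffer with two stages: an index list of the long
-- sentences, then slicing/joining between consecutive long indices; objective: alternative decomposition, return value only.

-- ===== PORT A =====
-- step of A's for-loop: state = (frases_limpias, buffer)
def pvStepA (min_len : Int) (st : List String × String) (frase : String) : List String × String :=
  if ((PySem.Str.split₀ frase).length : Int) < min_len then
    (st.1, st.2 ++ " " ++ frase)
  else if st.2 ≠ "" then
    (st.1 ++ [PySem.Str.strip st.2] ++ [frase], "")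
  else
    (st.1 ++ [frase], st.2)

def unir_frases_cortas (frases : List String) (min_len : Int) : List String :=
  let s := frases.foldl (pvStepA min_len) ([], "")
  if s.2 ≠ "" then s.1 ++ [PySem.Str.strip s.2] else s.1

-- ===== PORT B =====
-- longs = [i for i, f in enumerate(frases) if len(f.split()) >= min_len]
def pvLongs (min_len : Int) (frases : List String) : List Int :=
  ((PySem.List.enumerate frases 0).filter
      (fun p => min_len ≤ ((PySem.Str.split₀ p.2).length : Int))).map (fun p => p.1)

-- body of B's for-loop: state = (resultado, prev); frases[i] is always in range (i comes from enumerate)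
def pvStepB (frases : List String) (st : List String × Int) (i : Int) : List String × Int :=
  let res := if st.2 < i then
      st.1 ++ [PySem.Str.strip (PySem.Str.join " " (PySem.List.slice frases (some st.2) (some i)))]
    else st.1
  (res ++ [PySem.List.pyGetD frases i ""], i + 1)

def unir_frases_cortas_alt (frases : List String) (min_len : Int) : List String :=
  let s := (pvLongs min_len frases).foldl (pvStepB frases) ([], 0)
  if s.2 < (frases.length : Int) then
    s.1 ++ [PySem.Str.strip (PySem.Str.join " " (PySem.List.slice frases (some s.2) none))]
  else s.1

-- ===== PRECONDITION & SPEC =====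
def Spec_unir_frases_cortas (frases : List String) (min_len : Int) (out : List String) : Prop := out = unir_frases_cortas_alt frases min_len
instance (frases : List String) (min_len : Int) (out : List String) : Decidable (Spec_unir_frases_cortas frases min_len out) := by unfold Spec_unir_frases_cortas; infer_instance

-- ===== CLAIM =====
def Claim_equal_unir_frases_cortas : Prop := ∀ (frases : List String) (min_len : Int), Dom_unir_frases_cortas frases min_len → Spec_unir_frases_cortas frases min_len (unir_frases_cortas frases min_len)

-- ===== LEMMAS AND PROOFS =====

-- the short/long test, and the run decomposition both proofs meet in the middle at
def pvShort (min_len : Int) (f : String) : Bool := ((PySem.Str.split₀ f).length : Int) < min_len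

def pvGroups (min_len : Int) : List String → List String
  | [] => []
  | f :: rest =>
    if pvShort min_len f then
      PySem.Str.strip (PySem.Str.join " " (f :: rest.takeWhile (pvShort min_len)))
        :: pvGroups min_len (rest.dropWhile (pvShort min_len))
    else
      f :: pvGroups min_len rest
termination_by l => l.length
decreasing_by
  · exact Nat.lt_succ_of_le (List.length_dropWhile_le _ _)
  · simp

-- ---- A's side: A = pvGroups ----

def pvBuf : List String → String
  | [] => ""
  | f :: fs => " " ++ f ++ pvBuf fs

theorem pvBuf_ne_empty (f : String) (fs : List String) : pvBuf (f :: fs) ≠ "" := by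
  intro h
  have : (pvBuf (f :: fs)).toList = [] := by rw [h]; rfl
  simp [pvBuf] at this

theorem pvBuf_append_one (fs : List String) (f : String) :
    pvBuf (fs ++ [f]) = pvBuf fs ++ " " ++ f := by
  induction fs with
  | nil => simp [pvBuf]
  | cons g gs ih => simp [pvBuf, ih, String.append_assoc]

theorem pvIntercalate_cons₂ (a b : List Char) (L : List (List Char)) :
    [' '].intercalate (a :: b :: L) = a ++ ' ' :: [' '].intercalate (b :: L) := by
  simp [List.intercalate, List.intersperse]

theorem pvBuf_eq_space_join (f : String) (fs : List String) :
    pvBuf (f :: fs) = " " ++ PySem.Str.join " " (f :: fs) := by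
  induction fs generalizing f with
  | nil =>
    apply String.ext
    simp [pvBuf, PySem.Str.join, PySem.Chars.join, List.intercalate]
  | cons g gs ih =>
    apply String.ext
    have h1 := congrArg String.toList (ih g)
    simp [pvBuf, PySem.Str.join, PySem.Chars.join] at h1 ⊢
    rw [pvIntercalate_cons₂, ← h1]

theorem pvStrip_space (s : String) :
    PySem.Str.strip (" " ++ s) = PySem.Str.strip s := by
  apply String.ext
  simp [PySem.Str.strip, PySem.Chars.strip, PySem.Chars.lstrip]
  rw [List.dropWhile_cons_of_pos (show PySem.Chars.isspace ' ' = true by decide)]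

theorem pvMain (min_len : Int) (l : List String) (acc : List String) (pend : List String) :
    (let s := l.foldl (pvStepA min_len) (acc, pvBuf pend)
     if s.2 ≠ "" then s.1 ++ [PySem.Str.strip s.2] else s.1)
    = acc ++ (match pend with
        | [] => pvGroups min_len l
        | f :: fs =>
            PySem.Str.strip (PySem.Str.join " " ((f :: fs) ++ l.takeWhile (pvShort min_len)))
              :: pvGroups min_len (l.dropWhile (pvShort min_len))) := by
  induction l generalizing acc pend with
  | nil =>
    cases pend with
    | nil => simp [pvBuf, pvGroups]
    | cons f fs =>
      simp only [List.foldl_nil, List.takeWhile_nil, List.dropWhile_nil, List.append_nil]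
      rw [if_pos (pvBuf_ne_empty f fs), pvBuf_eq_space_join, pvStrip_space]
      simp [pvGroups]
  | cons f rest ih =>
    by_cases hs : pvShort min_len f
    · have hlt : ((PySem.Str.split₀ f).length : Int) < min_len := by
        simpa [pvShort] using hs
      have hstep : pvStepA min_len (acc, pvBuf pend) f = (acc, pvBuf (pend ++ [f])) := by
        simp [pvStepA, hlt, pvBuf_append_one]
      simp only [List.foldl_cons, hstep]
      rw [ih acc (pend ++ [f])]
      cases pend with
      | nil =>
        simp only [List.nil_append, List.singleton_append]
        rw [pvGroups, if_pos hs]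
      | cons g gs =>
        simp [List.takeWhile_cons_of_pos hs, List.dropWhile_cons_of_pos hs]
    · have hlong : ¬ (((PySem.Str.split₀ f).length : Int) < min_len) := by
        simpa [pvShort] using hs
      cases pend with
      | nil =>
        have hstep : pvStepA min_len (acc, pvBuf ([] : List String)) f = (acc ++ [f], pvBuf []) := by
          simp [pvStepA, pvBuf, hlong]
        simp only [List.foldl_cons, hstep]
        rw [ih (acc ++ [f]) []]
        rw [pvGroups, if_neg hs]
        simp
      | cons g gs =>
        have hstep : pvStepA min_len (acc, pvBuf (g :: gs)) f
            = (acc ++ [PySem.Str.strip (pvBuf (g :: gs))] ++ [f], pvBuf []) := by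
          simp only [pvStepA, if_neg hlong]
          rw [if_pos (pvBuf_ne_empty g gs)]
          simp [pvBuf]
        simp only [List.foldl_cons, hstep]
        rw [ih (acc ++ [PySem.Str.strip (pvBuf (g :: gs))] ++ [f]) []]
        rw [pvBuf_eq_space_join, pvStrip_space]
        simp [List.takeWhile_cons_of_neg hs, List.dropWhile_cons_of_neg hs, pvGroups, if_neg hs]

-- ---- B's side: B = pvGroups ----

-- pvLongs generalized over the enumerate start
def pvLongsE (min_len : Int) (s : Int) (l : List String) : List Int :=
  ((PySem.List.enumerate l s).filter
      (fun p => min_len ≤ ((PySem.Str.split₀ p.2).length : Int))).map (fun p => p.1)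

theorem pvLongsE_nil (min_len s : Int) : pvLongsE min_len s [] = [] := by
  simp [pvLongsE, PySem.List.enumerate_nil]

theorem pvLongsE_cons (min_len s : Int) (f : String) (l : List String) :
    pvLongsE min_len s (f :: l)
      = (if min_len ≤ ((PySem.Str.split₀ f).length : Int) then [s] else [])
        ++ pvLongsE min_len (s + 1) l := by
  by_cases h : min_len ≤ ((PySem.Str.split₀ f).length : Int) <;>
    simp [pvLongsE, PySem.List.enumerate_cons, h]

theorem pvTakeWhile_all {p : String → Bool} {l : List String}
    (h : ∀ x ∈ l, p x = true) : l.takeWhile p = l ∧ l.dropWhile p = [] := by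
  induction l with
  | nil => simp
  | cons f fs ih =>
    have hf := h f (by simp)
    have := ih (fun x hx => h x (by simp [hx]))
    simp [List.takeWhile_cons_of_pos hf, List.dropWhile_cons_of_pos hf, this]

theorem pvTakeWhile_run {p : String → Bool} {l1 : List String} {f : String} (l2 : List String)
    (h1 : ∀ x ∈ l1, p x = true) (hf : p f = false) :
    (l1 ++ f :: l2).takeWhile p = l1 ∧ (l1 ++ f :: l2).dropWhile p = f :: l2 := by
  induction l1 with
  | nil =>
    have h : ¬ p f = true := by simp [hf]
    simp [List.takeWhile_cons_of_neg h, List.dropWhile_cons_of_neg h]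
  | cons g gs ih =>
    have hg := h1 g (by simp)
    have := ih (fun x hx => h1 x (by simp [hx]))
    simp [List.takeWhile_cons_of_pos hg, List.dropWhile_cons_of_pos hg, this]

theorem pvGroups_all_short (min_len : Int) (l : List String)
    (h : ∀ x ∈ l, pvShort min_len x = true) (hne : l ≠ []) :
    pvGroups min_len l = [PySem.Str.strip (PySem.Str.join " " l)] := by
  cases l with
  | nil => exact absurd rfl hne
  | cons f fs =>
    have hf := h f (by simp)
    have hta := pvTakeWhile_all (p := pvShort min_len) (l := fs)
      (fun x hx => h x (by simp [hx]))
    rw [pvGroups, if_pos hf, hta.1, hta.2]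
    simp [pvGroups]

theorem pvGroups_run (min_len : Int) (mid : List String) (f : String) (rest : List String)
    (hm : ∀ x ∈ mid, pvShort min_len x = true) (hf : pvShort min_len f = false)
    (hne : mid ≠ []) :
    pvGroups min_len (mid ++ f :: rest)
      = PySem.Str.strip (PySem.Str.join " " mid) :: f :: pvGroups min_len rest := by
  cases mid with
  | nil => exact absurd rfl hne
  | cons m ms =>
    have hmm := hm m (by simp)
    have htr := pvTakeWhile_run (p := pvShort min_len) (l1 := ms) (l2 := rest)
      (fun x hx => hm x (by simp [hx])) hf
    have : ((m :: ms) ++ f :: rest) = m :: (ms ++ f :: rest) := by simp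
    rw [this, pvGroups, if_pos hmm, htr.1, htr.2, pvGroups, if_neg (by simp [hf])]

theorem pvBMain (min_len : Int) (frases : List String) :
    ∀ (rest : List String) (prev off : Nat) (acc : List String),
      prev ≤ off → off ≤ frases.length → frases.drop off = rest →
      (∀ x ∈ (frases.drop prev).take (off - prev), pvShort min_len x = true) →
      (let s := (pvLongsE min_len (off : Int) rest).foldl (pvStepB frases) (acc, (prev : Int))
       if s.2 < (frases.length : Int) then
         s.1 ++ [PySem.Str.strip (PySem.Str.join " " (PySem.List.slice frases (some s.2) none))]
       else s.1)
      = acc ++ pvGroups min_len (frases.drop prev) := by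
  intro rest
  induction rest with
  | nil =>
    intro prev off acc hpo hol hdrop hshort
    have hoff : off = frases.length := by
      have := List.drop_eq_nil_iff.mp hdrop; omega
    rw [pvLongsE_nil]
    simp only [List.foldl_nil]
    by_cases hp : prev < frases.length
    · rw [if_pos (by exact_mod_cast hp)]
      rw [PySem.List.slice_from_natCast]
      have hmid : (frases.drop prev).take (off - prev) = frases.drop prev := by
        apply List.take_of_length_le
        simp [hoff]
      have hne : frases.drop prev ≠ [] := by
        intro h
        have := List.drop_eq_nil_iff.mp h; omega
      rw [pvGroups_all_short min_len _ (by rw [← hmid]; exact hshort) hne]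
    · rw [if_neg (by exact_mod_cast hp)]
      have h0 : frases.drop prev = [] := List.drop_eq_nil_of_le (by omega)
      simp [h0, pvGroups]
  | cons f rest' ih =>
    intro prev off acc hpo hol hdrop hshort
    have hofflt : off < frases.length := by
      by_contra h
      rw [List.drop_eq_nil_of_le (by omega)] at hdrop
      exact absurd hdrop (by simp)
    have hgetf : frases[off]'hofflt = f := by
      have h0 : (frases.drop off)[0]'(by rw [hdrop]; simp) = f := by
        simp [hdrop]
      simpa using h0
    have hdrop' : frases.drop (off + 1) = rest' := by
      have h1 : frases.drop (off + 1) = (frases.drop off).drop 1 := by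
        rw [List.drop_drop]
      rw [h1, hdrop]; simp
    have hsplit : frases.drop prev = (frases.drop prev).take (off - prev) ++ f :: rest' := by
      have h := List.drop_take_append_drop frases prev (off - prev)
      rw [show prev + (off - prev) = off from by omega, hdrop] at h
      exact h.symm
    have hmidlen : ((frases.drop prev).take (off - prev)).length = off - prev := by
      simp; omega
    have hget : PySem.List.pyGetD frases ((off : Nat) : Int) "" = f := by
      rw [PySem.List.pyGetD_natCast, List.getD_eq_getElem _ _ hofflt, hgetf]
    have hcast : ((off : Nat) : Int) + 1 = (((off + 1 : Nat)) : Int) := by push_cast; ring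
    by_cases hf : min_len ≤ ((PySem.Str.split₀ f).length : Int)
    · have hfshort : pvShort min_len f = false := by
        simp only [pvShort, decide_eq_false_iff_not]; omega
      rw [pvLongsE_cons, if_pos hf]
      simp only [List.singleton_append, List.foldl_cons]
      by_cases hpp : prev < off
      · have hslice : PySem.List.slice frases (some ((prev : Nat) : Int)) (some ((off : Nat) : Int))
            = (frases.drop prev).take (off - prev) := by
          rw [PySem.List.slice_natCast]
        have hstep : pvStepB frases (acc, ((prev : Nat) : Int)) ((off : Nat) : Int)
            = (acc ++ [PySem.Str.strip (PySem.Str.join " " ((frases.drop prev).take (off - prev)))] ++ [f],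
               ((off : Nat) : Int) + 1) := by
          simp only [pvStepB, hslice, hget]
          rw [if_pos (by exact_mod_cast hpp)]
        rw [hstep, hcast]
        rw [ih (off + 1) (off + 1) _ (le_refl _) (by omega) hdrop' (by simp)]
        conv_rhs => rw [hsplit]
        rw [pvGroups_run min_len _ f rest' hshort hfshort
            (by intro h; rw [h] at hmidlen; simp at hmidlen; omega)]
        rw [hdrop']
        simp
      · have hpe : prev = off := by omega
        have hstep : pvStepB frases (acc, ((prev : Nat) : Int)) ((off : Nat) : Int)
            = (acc ++ [f], ((off : Nat) : Int) + 1) := by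
          simp only [pvStepB, hget]
          rw [if_neg (by exact_mod_cast hpp)]
        rw [hstep, hcast]
        rw [ih (off + 1) (off + 1) _ (le_refl _) (by omega) hdrop' (by simp)]
        have hdp : frases.drop prev = f :: rest' := by rw [hpe, hdrop]
        rw [hdp, hdrop']
        rw [pvGroups, if_neg (by simp [hfshort])]
        simp
    · have hfshort : pvShort min_len f = true := by
        simp only [pvShort, decide_eq_true_eq]; omega
      rw [pvLongsE_cons, if_neg hf]
      simp only [List.nil_append]
      rw [hcast]
      have htake : (frases.drop prev).take (off + 1 - prev)
          = (frases.drop prev).take (off - prev) ++ [f] := by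
        have hlen : off + 1 - prev = ((frases.drop prev).take (off - prev)).length + 1 := by omega
        conv_lhs => rw [hsplit]
        rw [hlen, List.take_append, List.take_of_length_le (by omega)]
        simp
      refine (ih prev (off + 1) acc (by omega) (by omega) hdrop' ?_)
      intro x hx
      rw [htake] at hx
      rcases List.mem_append.mp hx with h1 | h1
      · exact hshort x h1
      · simp at h1; rw [h1]; exact hfshort

-- ===== VERDICT =====
theorem unir_frases_cortas_spec : Claim_equal_unir_frases_cortas := by
  intro frases min_len _
  unfold Spec_unir_frases_cortas
  have hA : unir_frases_cortas frases min_len = pvGroups min_len frases := by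
    unfold unir_frases_cortas
    simpa using pvMain min_len frases [] []
  have hB : unir_frases_cortas_alt frases min_len = pvGroups min_len frases := by
    unfold unir_frases_cortas_alt
    have hL : pvLongs min_len frases = pvLongsE min_len ((0 : Nat) : Int) frases := by
      simp [pvLongs, pvLongsE]
    rw [hL]
    have h0 : (0 : Int) = ((0 : Nat) : Int) := by norm_num
    rw [h0]
    simpa using pvBMain min_len frases frases 0 0 [] (le_refl 0) (by omega) rfl (by simp)
  rw [hA, hB]
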